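-- pv_equiv track=rewrite | github.com/jakdalmak/ia-codyssey-DMU2025-2 | week06/sendmailV2.py | split_address_args
-- ===== SOURCE A (Python) =====
-- from typing import Iterable, List, Dict, Optional, Tuple
--
-- def split_address_args(items: Iterable[str]) -> List[str]:
--     out: List[str] = []
--     for it in items:
--         for part in it.split(','):
--             part = part.strip()
--             if part:
--                 out.append(part)
--     return out
-- ===== SOURCE B (Python) =====
-- from typing import Iterable, List
--
-- _WS = " \t\n\r"
--
-- def _ltrim(cs: List[str]) -> List[str]:
--     k = 0
--     while k < len(cs) and cs[k] in _WS:
--         k += 1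
--     return cs[k:]
--
-- def _flush(out: List[str], buf: List[str]) -> None:
--     t = _ltrim(buf)
--     t = _ltrim(t[::-1])[::-1]
--     if t:
--         out.append(''.join(t))
--
-- def split_address_args(items: Iterable[str]) -> List[str]:
--     # single character-level state machine: scan each item char by char,
--     # accumulating the current token and flushing it at each ',' and at item end
--     out: List[str] = []
--     for it in items:
--         buf: List[str] = []
--         for ch in it:
--             if ch == ',':
--                 _flush(out, buf)
--                 buf = []
--             else:
--                 buf.append(ch)
--         _flush(out, buf)
--     return out
-- ===== Notes on version B (the rewrite author's own statement) =====
-- stated objective: alternative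
-- what changed: Replaces A's per-item split()/strip() library passes with one explicit character-level state machine that accumulates the current token in a buffer, flushes it at each comma and at item end, and trims whitespace by hand-rolled index scans.
import Mathlib
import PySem

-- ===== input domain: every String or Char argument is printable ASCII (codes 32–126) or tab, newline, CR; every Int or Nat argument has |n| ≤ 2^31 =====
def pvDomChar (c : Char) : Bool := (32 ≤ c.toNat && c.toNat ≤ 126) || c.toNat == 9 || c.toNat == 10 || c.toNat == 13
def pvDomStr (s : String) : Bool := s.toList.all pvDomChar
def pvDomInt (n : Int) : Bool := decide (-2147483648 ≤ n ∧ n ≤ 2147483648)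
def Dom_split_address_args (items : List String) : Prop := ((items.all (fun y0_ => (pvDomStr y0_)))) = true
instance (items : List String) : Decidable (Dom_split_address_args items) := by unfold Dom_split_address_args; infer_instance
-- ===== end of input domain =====

-- B replaces A's per-item split()/strip() passes with an explicit character-level state
-- machine (buffer + flush on comma / item end, hand-rolled whitespace trim); objective:
-- alternative, same asymptotic cost. Equal on the ASCII domain Dom_split_address_args.

-- ===== PORT A =====
def split_address_args (items : List String) : List String :=
  items.foldl (fun out it =>
    (PySem.Chars.splitOn it.toList [',']).foldl (fun out part =>
      if !(PySem.Chars.strip part).isEmpty then out ++ [String.mk (PySem.Chars.strip part)] else out) out) []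

-- ===== PORT B =====
def pvIsWs (c : Char) : Bool := c == ' ' || c == '\t' || c == '\n' || c == '\r'

-- the index-advance while loop of _ltrim is exactly dropping the whitespace prefix
def pvLtrim (cs : List Char) : List Char := cs.dropWhile pvIsWs

def pvFlush (out : List String) (buf : List Char) : List String :=
  let t := pvLtrim buf
  let t := (pvLtrim t.reverse).reverse
  if !t.isEmpty then out ++ [String.mk t] else out

def split_address_args_alt (items : List String) : List String :=
  items.foldl (fun out it =>
    let st := it.toList.foldl
      (fun (s : List String × List Char) ch =>
        if ch == ',' then (pvFlush s.1 s.2, ([] : List Char)) else (s.1, s.2 ++ [ch]))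
      (out, ([] : List Char))
    pvFlush st.1 st.2) []

-- ===== PRECONDITION & SPEC =====
def Spec_split_address_args (items : List String) (out : List String) : Prop := out = split_address_args_alt items
instance (items : List String) (out : List String) : Decidable (Spec_split_address_args items out) := by unfold Spec_split_address_args; infer_instance

-- ===== CLAIM (what is proved, stated in full; the proofs are below) =====
def Claim_equal_split_address_args : Prop := ∀ (items : List String), Dom_split_address_args items → Spec_split_address_args items (split_address_args items)

-- ===== LEMMAS AND PROOFS =====

theorem char_beq_eq (c d : Char) : (c == d) = decide (c.toNat = d.toNat) := by
  rw [Bool.eq_iff_iff, beq_iff_eq, decide_eq_true_iff]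
  exact ⟨fun h => by subst h; rfl, fun h => Char.ext (UInt32.toNat_inj.mp h)⟩

-- on domain characters Python's isspace is exactly " \t\n\r"
theorem isspace_eq_pvIsWs {c : Char} (h : pvDomChar c = true) :
    PySem.Chars.isspace c = pvIsWs c := by
  simp only [char_beq_eq, PySem.Chars.isspace, pvIsWs, pvDomChar] at *
  rw [Bool.eq_iff_iff]
  simp only [Bool.or_eq_true, Bool.and_eq_true, decide_eq_true_eq, beq_iff_eq,
    show (' ').toNat = 32 from rfl, show ('\t').toNat = 9 from rfl,
    show ('\n').toNat = 10 from rfl, show ('\r').toNat = 13 from rfl] at *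
  omega

theorem dropWhile_ws_eq {cs : List Char} (h : ∀ c ∈ cs, pvDomChar c = true) :
    cs.dropWhile PySem.Chars.isspace = cs.dropWhile pvIsWs := by
  induction cs with
  | nil => rfl
  | cons x xs ih =>
    have hx := isspace_eq_pvIsWs (h x (List.mem_cons_self))
    simp only [List.dropWhile_cons, hx]
    split
    · exact ih (fun c hc => h c (List.mem_cons_of_mem _ hc))
    · rfl

-- on domain buffers B's hand trim computes Python's strip
theorem trim_eq_strip {cs : List Char} (h : ∀ c ∈ cs, pvDomChar c = true) :
    (pvLtrim (pvLtrim cs).reverse).reverse = PySem.Chars.strip cs := by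
  have h1 : ∀ c ∈ (cs.dropWhile pvIsWs).reverse, pvDomChar c = true := by
    intro c hc
    exact h c ((List.dropWhile_sublist _).mem (List.mem_reverse.mp hc))
  simp only [pvLtrim, PySem.Chars.strip, PySem.Chars.lstrip, PySem.Chars.rstrip,
    dropWhile_ws_eq h, dropWhile_ws_eq h1]

-- the scanner over cs starting from a comma-free buffer computes A's fold over the comma split
theorem scan_spec (cs : List Char) : ∀ (buf : List Char) (out : List String), (∀ c ∈ buf, ¬ c = ',') →
    pvFlush (cs.foldl
        (fun (s : List String × List Char) ch =>
          if ch == ',' then (pvFlush s.1 s.2, ([] : List Char)) else (s.1, s.2 ++ [ch]))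
        (out, buf)).1
      (cs.foldl
        (fun (s : List String × List Char) ch =>
          if ch == ',' then (pvFlush s.1 s.2, ([] : List Char)) else (s.1, s.2 ++ [ch]))
        (out, buf)).2
    = ((buf ++ cs).splitOnP (· == ',')).foldl pvFlush out := by
  induction cs with
  | nil =>
    intro buf out hbuf
    rw [List.append_nil, List.splitOnP_eq_single _ _ (fun x hx => by simpa using hbuf x hx)]
    rfl
  | cons ch cs ih =>
    intro buf out hbuf
    by_cases hch : ch = ','
    · subst hch
      rw [List.splitOnP_first _ _ (by simpa using hbuf) ',' (by simp) cs]
      simpa using ih [] (pvFlush out buf) (by simp)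
    · have : buf ++ ch :: cs = (buf ++ [ch]) ++ cs := by simp
      rw [this]
      have := ih (buf ++ [ch]) out (by
        intro c hc
        rcases List.mem_append.mp hc with h | h
        · exact hbuf c h
        · simp at h; subst h; exact hch)
      simpa [hch] using this

-- PySem's fuelled comma-split computes List.splitOnP on the separator character
theorem splitOn_go_spec (c : Char) : ∀ (fuel : Nat) (l cur : List Char) (acc : List (List Char)), l.length ≤ fuel →
    PySem.Chars.splitOn.go [c] fuel l cur acc = acc.reverse ++ (l.splitOnP (· == c)).modifyHead (cur.reverse ++ ·) := by
  intro fuel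
  induction fuel with
  | zero => intro l cur acc hf
            have : l = [] := List.eq_nil_of_length_eq_zero (Nat.le_zero.mp hf)
            subst this
            simp [PySem.Chars.splitOn.go]
  | succ n ih =>
    intro l cur acc hf
    cases l with
    | nil => simp [PySem.Chars.splitOn.go]
    | cons x rest =>
      rw [PySem.Chars.splitOn.go.eq_def]
      by_cases hx : x = c
      · subst hx
        have hpre : [x].isPrefixOf (x :: rest) = true := by simp [List.isPrefixOf]
        simp only [hpre, if_true]
        rw [ih]
        · simp [List.splitOnP_cons]
          rw [show (fun (y : List Char) => y) = id from rfl]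
          simp
        · simpa using Nat.le_of_succ_le_succ hf
      · have hpre : [c].isPrefixOf (x :: rest) = false := by
          simp [List.isPrefixOf]
          exact fun h => (hx h.symm).elim
        simp only [hpre, Bool.false_eq_true, if_false]
        rw [ih rest (x :: cur) acc (by simpa using Nat.le_of_succ_le_succ hf)]
        have hne := List.splitOnP_ne_nil (· == c) rest
        simp [List.splitOnP_cons, hx, List.modifyHead_modifyHead, Function.comp_def]

theorem splitOn_single (c : Char) (cs : List Char) :
    PySem.Chars.splitOn cs [c] = cs.splitOnP (· == c) := by
  unfold PySem.Chars.splitOn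
  rw [splitOn_go_spec c (cs.length + 1) cs [] [] (Nat.le_succ _)]
  simp
  rw [show (fun (y : List Char) => y) = id from rfl]
  simp

-- A's inner fold step is pvFlush once strip is rewritten to B's trim (domain item)
theorem aFold_eq {parts : List (List Char)} (hd : ∀ p ∈ parts, ∀ c ∈ p, pvDomChar c = true) :
    ∀ out, parts.foldl (fun out part =>
      if !(PySem.Chars.strip part).isEmpty then out ++ [String.mk (PySem.Chars.strip part)] else out) out
    = parts.foldl pvFlush out := by
  induction parts with
  | nil => intro out; rfl
  | cons p ps ih =>
    intro out
    have hp := trim_eq_strip (hd p List.mem_cons_self)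
    simp only [List.foldl_cons]
    rw [ih (fun q hq => hd q (List.mem_cons_of_mem _ hq))]
    congr 1
    simp [pvFlush, hp]

theorem mem_splitOnP_subset : ∀ (cs p : List Char), p ∈ cs.splitOnP (· == ',') → ∀ c ∈ p, c ∈ cs := by
  intro cs
  induction cs with
  | nil => intro p hp c hc; simp [List.splitOnP_nil] at hp; subst hp; simp at hc
  | cons x xs ih =>
    intro p hp c hc
    rw [List.splitOnP_cons] at hp
    by_cases hx : x = ','
    · simp only [hx] at hp
      rcases List.mem_cons.mp hp with h | h
      · subst h; simp at hc
      · exact List.mem_cons_of_mem _ (ih p h c hc)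
    · simp only [beq_iff_eq, hx, if_false] at hp
      obtain ⟨q, t, hqt⟩ := List.exists_cons_of_ne_nil (List.splitOnP_ne_nil (· == ',') xs)
      rw [hqt, List.modifyHead_cons] at hp
      rcases List.mem_cons.mp hp with h | h
      · subst h
        rcases List.mem_cons.mp hc with h | h
        · subst h; exact List.mem_cons_self
        · exact List.mem_cons_of_mem _ (ih q (hqt ▸ List.mem_cons_self) c h)
      · exact List.mem_cons_of_mem _ (ih p (hqt ▸ List.mem_cons_of_mem _ h) c hc)

-- one item: A's split/strip fold equals B's character scanner
theorem item_eq (it : String) (hit : pvDomStr it = true) (out : List String) :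
    (PySem.Chars.splitOn it.toList [',']).foldl (fun out part =>
      if !(PySem.Chars.strip part).isEmpty then out ++ [String.mk (PySem.Chars.strip part)] else out) out
    = pvFlush (it.toList.foldl
        (fun (s : List String × List Char) ch =>
          if ch == ',' then (pvFlush s.1 s.2, ([] : List Char)) else (s.1, s.2 ++ [ch]))
        (out, ([] : List Char))).1
      (it.toList.foldl
        (fun (s : List String × List Char) ch =>
          if ch == ',' then (pvFlush s.1 s.2, ([] : List Char)) else (s.1, s.2 ++ [ch]))
        (out, ([] : List Char))).2 := by
  have hdom : ∀ c ∈ it.toList, pvDomChar c = true := by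
    simpa [pvDomStr, List.all_eq_true] using hit
  rw [splitOn_single, aFold_eq (fun p hp c hc => hdom c (mem_splitOnP_subset _ p hp c hc)),
    scan_spec it.toList [] out (by simp)]
  rfl

-- ===== VERDICT (by name: the statement is the Claim_ definition above) =====
theorem split_address_args_spec : Claim_equal_split_address_args := by
  intro items hdom
  unfold Spec_split_address_args split_address_args split_address_args_alt
  unfold Dom_split_address_args at hdom
  simp only [List.all_eq_true] at hdom
  exact PySem.List.foldl_congr_mem items _ _ [] (fun out it hit => item_eq it (hdom it hit) out)
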